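-- pv_equiv track=rewrite | github.com/aglab2/StarRoadN64 | scripts/mesh_optimizer.py | _longest_link
-- ===== SOURCE A (Python) =====
-- def _longest_link(links, links_end):
--     starting_vtxs     = [ vtx for vtx in links if vtx not in links_end ]
--     intermediate_vtxs = [ vtx for vtx in links if vtx     in links_end ]
--
--     # Fire DFS search preferring 'starting_vtxs' and 'intermediate_vtxs'
--     # Note that at most recursion can go 5 levels so doing something like this is fine
--     def dfs(vtx, visited_links):
--         if len(visited_links) == 5:
--             return visited_links
--         if vtx not in links:
--             return visited_links
--
--         for vtx_next in links[vtx]: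
--             link = vtx, vtx_next
--             if link in visited_links:
--                 continue
--
--             visited_links_copy = visited_links[:]
--             visited_links_copy.append(link)
--             new_visited_links = dfs(vtx_next, visited_links_copy)
--             if new_visited_links:
--                 return new_visited_links
--
--         return visited_links
--
--     longest_link = []
--     for vtx in starting_vtxs:
--         link = dfs(vtx, [])
--         if len(link) > len(longest_link):
--             longest_link = link
--         if 5 == len(longest_link):
--             return longest_link
--
--     for vtx in intermediate_vtxs:
--         link = dfs(vtx, [])
--         if len(link) > len(longest_link):
--             longest_link = link
--         if 5 == len(longest_link):
--             return longest_link
--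
--     return longest_link
-- ===== SOURCE B (Python) =====
-- def _longest_link(links, links_end):
--     ends = set(links_end)
--
--     def walk(start):
--         # iterative greedy walk: commit to the first unused edge, up to 5 edges
--         path = []
--         cur = start
--         while len(path) < 5 and cur in links:
--             nxt = next((v for v in links[cur] if (cur, v) not in path), None)
--             if nxt is None:
--                 break
--             path.append((cur, nxt))
--             cur = nxt
--         return path
--
--     order = [v for v in links if v not in ends] + [v for v in links if v in ends]
--     best = []
--     for vtx in order:
--         path = walk(vtx)
--         if len(path) > len(best):
--             best = path
--         if len(best) == 5:
--             break
--     return best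
-- ===== Notes on version B (the rewrite author's own statement) =====
-- stated objective: faster
-- what changed: Replaces the recursive commit-to-first-edge DFS (which copies the visited-links list at every level and tests seed membership by list scan) with an explicit iterative greedy walk that appends in place, uses a set for links_end membership, and merges A's two seed loops into one loop over the concatenated seed order.
import Mathlib
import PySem

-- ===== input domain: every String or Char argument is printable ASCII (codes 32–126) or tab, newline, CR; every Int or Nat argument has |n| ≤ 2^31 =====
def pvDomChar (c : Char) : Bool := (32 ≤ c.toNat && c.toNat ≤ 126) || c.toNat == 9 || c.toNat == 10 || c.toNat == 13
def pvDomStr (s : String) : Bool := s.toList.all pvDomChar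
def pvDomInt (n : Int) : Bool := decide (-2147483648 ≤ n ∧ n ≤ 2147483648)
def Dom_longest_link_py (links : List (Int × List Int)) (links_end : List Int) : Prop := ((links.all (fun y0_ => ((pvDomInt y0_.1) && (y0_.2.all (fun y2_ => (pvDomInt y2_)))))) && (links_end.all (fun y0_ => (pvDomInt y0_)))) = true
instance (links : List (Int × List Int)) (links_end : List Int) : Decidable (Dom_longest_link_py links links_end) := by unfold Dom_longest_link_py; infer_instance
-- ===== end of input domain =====

-- B replaces A's recursive one-edge-commit DFS by an explicit iterative greedy walk and
-- merges A's two seed loops into one loop over a concatenated seed order (alternative decomposition).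


-- ===== PORT A =====
-- A's recursive dfs; the Nat fuel only makes the recursion total (Python's recursion depth
-- here is bounded by 6, so fuel 6 from the wrapper is never exhausted).
mutual
def dfsA (links : List (Int × List Int)) : Nat → Int → List (Int × Int) → List (Int × Int)
  | 0, _, visited => visited
  | fuel + 1, vtx, visited =>
    if visited.length = 5 then visited
    else
      match (PySem.Dict.mk links).get? vtx with
      | none => visited
      | some ns => dfsALoop links fuel vtx ns visited
  termination_by f _ _ => (f, 0, 0)

def dfsALoop (links : List (Int × List Int)) : Nat → Int → List Int → List (Int × Int) → List (Int × Int)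
  | _, _, [], visited => visited
  | fuel, vtx, n :: rest, visited =>
    if (vtx, n) ∈ visited then dfsALoop links fuel vtx rest visited
    else
      let r := dfsA links fuel n (visited ++ [(vtx, n)])
      if r = [] then dfsALoop links fuel vtx rest visited else r
  termination_by f _ ns _ => (f, 1, ns.length)
end

-- A's per-seed loop: updates the best path, flag = early 'return' at length 5
def llLoopA (links : List (Int × List Int)) : List Int → List (Int × Int) → List (Int × Int) × Bool
  | [], best => (best, false)
  | v :: rest, best =>
    let link := dfsA links 6 v []
    let best' := if best.length < link.length then link else best
    if best'.length = 5 then (best', true) else llLoopA links rest best'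

def longest_link_py (links : List (Int × List Int)) (links_end : List Int) : List (Int × Int) :=
  let keys := (PySem.Dict.mk links).keys
  let starting := keys.filter (fun v => decide (v ∉ links_end))
  let inter := keys.filter (fun v => decide (v ∈ links_end))
  let p := llLoopA links starting []
  if p.2 then p.1 else (llLoopA links inter p.1).1

-- ===== PORT B =====
-- B's iterative greedy walk: take the first unused edge from cur, up to 5 edges
def walkB (links : List (Int × List Int)) (cur : Int) (path : List (Int × Int)) : List (Int × Int) :=
  if _h : path.length < 5 then
    match (PySem.Dict.mk links).get? cur with
    | none => path
    | some ns =>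
      match ns.find? (fun v => !path.contains (cur, v)) with
      | none => path
      | some v => walkB links v (path ++ [(cur, v)])
  else path
  termination_by 5 - path.length
  decreasing_by simp; omega

def llLoopB (links : List (Int × List Int)) : List Int → List (Int × Int) → List (Int × Int)
  | [], best => best
  | v :: rest, best =>
    let path := walkB links v []
    let best' := if best.length < path.length then path else best
    if best'.length = 5 then best' else llLoopB links rest best'

def longest_link_py_alt (links : List (Int × List Int)) (links_end : List Int) : List (Int × Int) :=
  let keys := (PySem.Dict.mk links).keys
  let order := keys.filter (fun v => !links_end.contains v) ++ keys.filter (fun v => links_end.contains v)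
  llLoopB links order []

-- ===== PRECONDITION & SPEC =====
def Spec_longest_link_py (links : List (Int × List Int)) (links_end : List Int) (out : List (Int × Int)) : Prop := out = longest_link_py_alt links links_end
instance (links : List (Int × List Int)) (links_end : List Int) (out : List (Int × Int)) : Decidable (Spec_longest_link_py links links_end out) := by unfold Spec_longest_link_py; infer_instance

-- ===== CLAIM (what is proved, stated in full; the proofs are below) =====
def Claim_equal_longest_link_py : Prop := ∀ (links : List (Int × List Int)) (links_end : List Int), Dom_longest_link_py links links_end → Spec_longest_link_py links links_end (longest_link_py links links_end)


-- ===== LEMMAS AND PROOFS =====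

-- dfsA / dfsALoop never shorten their accumulator (so the committed call is never empty)
theorem dfs_walk_len (links : List (Int × List Int)) :
    ∀ f, (∀ vtx visited, (visited : List (Int × Int)).length ≤ (dfsA links f vtx visited).length) ∧
         (∀ vtx ns visited, (visited : List (Int × Int)).length ≤ (dfsALoop links f vtx ns visited).length) := by
  intro f
  induction f with
  | zero =>
    have hA : ∀ vtx visited, (visited : List (Int × Int)).length ≤ (dfsA links 0 vtx visited).length := by
      intro vtx visited; simp [dfsA]
    refine ⟨hA, ?_⟩
    intro vtx ns
    induction ns with
    | nil => intro visited; simp [dfsALoop]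
    | cons n rest ih =>
      intro visited
      rw [dfsALoop]
      split_ifs with h1
      · exact ih visited
      · simp only
        split_ifs with h2
        · exact ih visited
        · have := hA n (visited ++ [(vtx, n)])
          simp at this; omega
  | succ f ihf =>
    have hA : ∀ vtx visited, (visited : List (Int × Int)).length ≤ (dfsA links (f+1) vtx visited).length := by
      intro vtx visited
      rw [dfsA]
      split_ifs with h1
      · simp
      · cases hg : (PySem.Dict.mk links).get? vtx with
        | none => simp
        | some ns => exact ihf.2 vtx ns visited
    refine ⟨hA, ?_⟩
    intro vtx ns
    induction ns with
    | nil => intro visited; simp [dfsALoop]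
    | cons n rest ih =>
      intro visited
      rw [dfsALoop]
      split_ifs with h1
      · exact ih visited
      · simp only
        split_ifs with h2
        · exact ih visited
        · have := hA n (visited ++ [(vtx, n)])
          simp at this; omega

-- A's dfs, with enough fuel, IS B's greedy walk
theorem dfs_eq_walk (links : List (Int × List Int)) :
    ∀ f, (∀ (visited : List (Int × Int)) vtx, visited.length ≤ 5 → 5 - visited.length < f →
            dfsA links f vtx visited = walkB links vtx visited) ∧
         (∀ vtx ns (visited : List (Int × Int)), visited.length < 5 → 5 - visited.length ≤ f →
            dfsALoop links f vtx ns visited =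
              (match ns.find? (fun v => !visited.contains (vtx, v)) with
               | none => visited
               | some n => walkB links n (visited ++ [(vtx, n)]))) := by
  intro f
  induction f with
  | zero => exact ⟨by omega, by intro vtx ns visited h1 h2; omega⟩
  | succ f ihf =>
    have hA : ∀ (visited : List (Int × Int)) vtx, visited.length ≤ 5 → 5 - visited.length < f + 1 →
        dfsA links (f+1) vtx visited = walkB links vtx visited := by
      intro visited vtx hle hf
      rw [dfsA, walkB]
      by_cases h5 : visited.length = 5
      · simp [h5]
      · have hlt : visited.length < 5 := by omega
        simp only [h5, if_false, dif_pos hlt]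
        cases hg : (PySem.Dict.mk links).get? vtx with
        | none => simp
        | some ns =>
          simp only
          rw [ihf.2 vtx ns visited hlt (by omega)]
    refine ⟨hA, ?_⟩
    intro vtx ns
    induction ns with
    | nil => intro visited h1 h2; simp [dfsALoop]
    | cons n rest ih =>
      intro visited hlt hf
      rw [dfsALoop]
      by_cases hmem : (vtx, n) ∈ visited
      · rw [if_pos hmem]
        rw [ih visited hlt hf]
        rw [List.find?_cons_of_neg (by simp [hmem])]
      · rw [if_neg hmem]
        have hne : dfsA links (f+1) n (visited ++ [(vtx, n)]) ≠ [] := by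
          have := (dfs_walk_len links (f+1)).1 n (visited ++ [(vtx, n)])
          intro hc; rw [hc] at this; simp at this
        simp only
        rw [if_neg hne]
        rw [List.find?_cons_of_pos (by simp [hmem])]
        exact hA (visited ++ [(vtx, n)]) n (by simp; omega) (by simp; omega)

theorem llLoopA_fst (links : List (Int × List Int)) :
    ∀ l best, (llLoopA links l best).1 = llLoopB links l best := by
  intro l
  induction l with
  | nil => intro best; simp [llLoopA, llLoopB]
  | cons v rest ih =>
    intro best
    simp only [llLoopA, llLoopB]
    rw [(dfs_eq_walk links 6).1 [] v (by simp) (by simp)]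
    by_cases h : (if best.length < (walkB links v []).length then walkB links v [] else best).length = 5
    · rw [if_pos h, if_pos h]
    · rw [if_neg h, if_neg h]; exact ih _

theorem llLoopB_append (links : List (Int × List Int)) :
    ∀ l1 l2 best, llLoopB links (l1 ++ l2) best =
      (if (llLoopA links l1 best).2 then (llLoopA links l1 best).1
       else llLoopB links l2 (llLoopA links l1 best).1) := by
  intro l1
  induction l1 with
  | nil => intro l2 best; simp [llLoopA]
  | cons v rest ih =>
    intro l2 best
    rw [List.cons_append]
    simp only [llLoopB, llLoopA]
    rw [(dfs_eq_walk links 6).1 [] v (by simp) (by simp)]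
    by_cases h : (if best.length < (walkB links v []).length then walkB links v [] else best).length = 5
    · rw [if_pos h, if_pos h]; simp
    · rw [if_neg h, if_neg h]; exact ih l2 _

-- ===== VERDICT (by name: the statement is the Claim_ definition above) =====
theorem longest_link_py_spec : Claim_equal_longest_link_py := by
  intro links links_end _
  unfold Spec_longest_link_py longest_link_py longest_link_py_alt
  simp only
  have hfilt1 : ((PySem.Dict.mk links).keys.filter (fun v => !links_end.contains v)) =
      ((PySem.Dict.mk links).keys.filter (fun v => decide (v ∉ links_end))) := by
    apply List.filter_congr; intro x _; simp
  have hfilt2 : ((PySem.Dict.mk links).keys.filter (fun v => links_end.contains v)) =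
      ((PySem.Dict.mk links).keys.filter (fun v => decide (v ∈ links_end))) := by
    apply List.filter_congr; intro x _; simp
  rw [hfilt1, hfilt2, llLoopB_append]
  split_ifs with h
  · rfl
  · rw [llLoopA_fst]
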